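-- pv_equiv track=rewrite | github.com/ddb8036631/algorithm | src/프로그래머스_Level3/programmers_92343_양과늑대.py | solution
-- ===== SOURCE A (Python) =====
-- def solution(info, edges):
--     def dfs(idx, sheep, wolf, path):
--         if info[idx] == 0:
--             sheep += 1
--         else:
--             wolf += 1
--
--         if wolf >= sheep:
--             return 0
--
--         max_cnt = sheep
--
--         for now in path:
--             for fr, to in edges:
--                 if now == fr and to not in path:
--                     path.append(to)
--                     max_cnt = max(max_cnt, dfs(to, sheep, wolf, path))
--                     path.pop()
--
--         return max_cnt
--
--     return dfs(0, 0, 0, [0])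
-- ===== SOURCE B (Python) =====
-- def solution(info, edges):
--     adj = {}
--     for fr, to in edges:
--         adj.setdefault(fr, []).append(to)
--     cur = {frozenset([0])}
--     best = 0
--     while cur:
--         nxt = set()
--         for state in cur:
--             sheep = sum(1 for i in state if info[i] == 0)
--             if 2 * sheep <= len(state):
--                 continue
--             if sheep > best:
--                 best = sheep
--             for node in state:
--                 for to in adj.get(node, ()):
--                     if to not in state:
--                         nxt.add(state | {to})
--         cur = nxt
--     return best
-- ===== Notes on version B (the rewrite author's own statement) =====
-- stated objective: alternative
-- what changed: A is a recursive DFS that re-explores a subtree once per order in which its nodes can be appended to `path`; B precomputes an adjacency dict and runs a breadth-first fixpoint loop over frozensets of visited nodes, processing each distinct reachable node set at most once (it trades A's recursion for set-keyed deduplicated iteration).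
import Mathlib
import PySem

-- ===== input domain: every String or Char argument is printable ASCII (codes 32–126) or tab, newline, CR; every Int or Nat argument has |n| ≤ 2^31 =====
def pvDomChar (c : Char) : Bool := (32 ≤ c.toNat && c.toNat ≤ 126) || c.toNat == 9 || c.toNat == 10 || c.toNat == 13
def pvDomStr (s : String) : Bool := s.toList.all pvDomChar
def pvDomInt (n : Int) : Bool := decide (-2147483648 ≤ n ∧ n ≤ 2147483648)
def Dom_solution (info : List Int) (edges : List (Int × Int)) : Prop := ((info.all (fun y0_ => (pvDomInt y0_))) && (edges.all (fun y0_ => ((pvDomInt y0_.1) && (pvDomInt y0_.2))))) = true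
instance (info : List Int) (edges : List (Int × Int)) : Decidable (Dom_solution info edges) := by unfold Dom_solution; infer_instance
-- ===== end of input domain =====

-- B replaces A's path-order recursive DFS by a breadth-first fixpoint loop over node SETS (each
-- distinct reachable node set processed once); equivalence of the RETURN value is proved on Pre_.

-- ===== PORT A =====
-- dfs(idx, sheep, wolf, path); the fuel argument only makes the recursion structural — it starts at
-- len(edges)+1 and never runs out: path holds distinct labels from {0} ∪ {edge targets}, so the
-- recursion depth is at most len(edges) (proved via ReachL below).
def dfsA (info : List Int) (edges : List (Int × Int)) : Nat → Int → Int → Int → List Int → Int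
  | 0, _, _, _, _ => 0
  | fuel+1, idx, sheep, wolf, path =>
    let sheep := if (PySem.List.pyGet? info idx).getD 0 == 0 then sheep + 1 else sheep
    let wolf := if (PySem.List.pyGet? info idx).getD 0 == 0 then wolf else wolf + 1
    if sheep ≤ wolf then 0
    else
      path.foldl (fun acc now =>
        edges.foldl (fun acc2 e =>
          if now == e.1 && !(path.contains e.2) then
            max acc2 (dfsA info edges fuel e.2 sheep wolf (path ++ [e.2]))
          else acc2) acc) sheep

def solution (info : List Int) (edges : List (Int × Int)) : Int :=
  dfsA info edges (edges.length + 1) 0 0 0 [0]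

-- ===== PORT B =====
-- a frozenset of ints is modelled canonically by the sorted list of its elements; the set of states by
-- PySem.Set (dedup by list equality).  insSorted inserts a fresh element keeping the list sorted (= s | {to}).
def insSorted (x : Int) : List Int → List Int
  | [] => [x]
  | y :: t => if x ≤ y then x :: y :: t else y :: insSorted x t

-- the body of 'for state in cur' (accumulator = (nxt, best)); iteration order of the Python set cur
-- only feeds a running max and set unions, so any order is exact.
def stepB (info : List Int) (adj : PySem.Dict Int (List Int)) (acc : List (List Int) × Int) (state : List Int) : List (List Int) × Int :=
  let sheep := state.foldl (fun c i => if (PySem.List.pyGet? info i).getD 0 == 0 then c + 1 else c) (0 : Int)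
  if 2 * sheep ≤ (state.length : Int) then acc
  else
    let best := if acc.2 < sheep then sheep else acc.2
    let nxt := state.foldl (fun nx node =>
        (adj.getD node []).foldl (fun nx2 t2 =>
          if state.contains t2 then nx2 else PySem.Set.add nx2 (insSorted t2 state)) nx) acc.1
    (nxt, best)

-- 'while cur:' runs at most len(edges)+1 rounds (the states of round j have j+1 of the at most
-- 1+len(edges) possible labels {0} ∪ {edge targets}), so it is ported as a fold over that many
-- rounds; once cur is empty a round is a no-op, exactly like the loop having stopped.
def solution_alt (info : List Int) (edges : List (Int × Int)) : Int :=
  let adj := edges.foldl (fun d e => d.modify e.1 [] (· ++ [e.2])) (PySem.Dict.empty)  -- adj.setdefault(fr, []).append(to)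
  ((List.range (edges.length + 1)).foldl
      (fun cb _ => cb.1.foldl (stepB info adj) (([] : List (List Int)), cb.2))
      ([[0]], (0 : Int))).2

-- ===== PRECONDITION & SPEC =====
-- Pre_ excludes only empty info, where both Pythons raise IndexError on info[0].  (On a non-empty
-- info both Pythons raise IndexError together iff an edge chain reaches an index outside
-- [-len(info), len(info)); the ports are total via getD and are proven equal on all inputs.)
def Pre_solution (info : List Int) (edges : List (Int × Int)) : Prop := info ≠ []
instance (info : List Int) (edges : List (Int × Int)) : Decidable (Pre_solution info edges) := by unfold Pre_solution; infer_instance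
def pvWitness_solution : List Int × (List (Int × Int)) := ([0, 0, 1, 0], [(0, 1), (1, 2), (1, 3)])

def Spec_solution (info : List Int) (edges : List (Int × Int)) (out : Int) : Prop := out = solution_alt info edges
instance (info : List Int) (edges : List (Int × Int)) (out : Int) : Decidable (Spec_solution info edges out) := by unfold Spec_solution; infer_instance

-- ===== CLAIM (what is proved, stated in full; the proofs are below) =====
def Claim_equal_solution : Prop := ∀ (info : List Int) (edges : List (Int × Int)), Dom_solution info edges → Pre_solution info edges → Spec_solution info edges (solution info edges)

-- ===== LEMMAS AND PROOFS =====

-- number of sheep on a list of node indices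
def shL (info : List Int) (p : List Int) : Int :=
  (p.countP (fun i => (PySem.List.pyGet? info i).getD 0 == 0) : Int)

-- "strictly more sheep than wolves"
def validL (info : List Int) (p : List Int) : Prop := (p.length : Int) < 2 * shL info p

-- the states A's dfs can build: [0] plus repeated extension of a valid state along an edge from a member
inductive ReachL (info : List Int) (edges : List (Int × Int)) : List Int → Prop
  | base : ReachL info edges [0]
  | step {p : List Int} {fr t : Int} : ReachL info edges p → validL info p →
      (fr, t) ∈ edges → fr ∈ p → t ∉ p → ReachL info edges (p ++ [t])

-- ---------- generic fold lemmas ----------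
lemma pv_foldl_ge {α : Type} (g : Int → α → Int) (hg : ∀ a e, a ≤ g a e) (l : List α) (a : Int) :
    a ≤ l.foldl g a := by
  induction l generalizing a with
  | nil => simp
  | cons x t ih => exact le_trans (hg a x) (ih _)

lemma pv_foldl_le_of_mem {α : Type} {g : Int → α → Int} (hg : ∀ a e, a ≤ g a e) {x : α} {l : List α}
    (hx : x ∈ l) {v : Int} (hv : ∀ a, v ≤ g a x) (b : Int) : v ≤ l.foldl g b := by
  obtain ⟨l1, l2, rfl⟩ := List.append_of_mem hx
  rw [List.foldl_append, List.foldl_cons]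
  exact le_trans (hv _) (pv_foldl_ge g hg l2 _)

lemma pv_foldl_mem_mono {α β : Type} {g : List α → β → List α} (hg : ∀ s e x, x ∈ s → x ∈ g s e)
    (l : List β) (s : List α) {x : α} (hx : x ∈ s) : x ∈ l.foldl g s := by
  induction l generalizing s with
  | nil => exact hx
  | cons b t ih => exact ih _ (hg _ _ _ hx)

lemma pv_foldl_mem_of_mem {α β : Type} {g : List α → β → List α} (hg : ∀ s e x, x ∈ s → x ∈ g s e)
    {e : β} {l : List β} (he : e ∈ l) {v : α} (hv : ∀ s, v ∈ g s e) (s0 : List α) :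
    v ∈ l.foldl g s0 := by
  obtain ⟨l1, l2, rfl⟩ := List.append_of_mem he
  rw [List.foldl_append, List.foldl_cons]
  exact pv_foldl_mem_mono hg l2 _ (hv _)

lemma pv_foldl_const {α β : Type} (f : β → β) (l : List α) (x : β) :
    l.foldl (fun b _ => f b) x = f^[l.length] x := by
  induction l generalizing x with
  | nil => rfl
  | cons a t ih => simp [List.foldl_cons, ih, Function.iterate_succ_apply]

-- ---------- counting ----------
lemma shL_nonneg (info p : List Int) : 0 ≤ shL info p := by
  simp [shL]

lemma shL_append_singleton (info : List Int) (p : List Int) (t : Int) :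
    shL info (p ++ [t]) = shL info p + (if (PySem.List.pyGet? info t).getD 0 == 0 then 1 else 0) := by
  simp [shL, List.countP_append, List.countP_cons]

lemma shL_perm (info : List Int) {p q : List Int} (h : p.Perm q) : shL info p = shL info q := by
  simp [shL, h.countP_eq]

lemma validL_perm (info : List Int) {p q : List Int} (h : p.Perm q) :
    (validL info p ↔ validL info q) := by
  simp [validL, h.length_eq, shL_perm info h]

lemma sheepCnt_eq (info s : List Int) :
    s.foldl (fun c i => if (PySem.List.pyGet? info i).getD 0 == 0 then c + 1 else c) (0 : Int)
      = shL info s := by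
  rw [PySem.List.foldl_if_add_one]; simp [shL]

-- ---------- ReachL invariants ----------
lemma reachL_ne_nil {info : List Int} {edges : List (Int × Int)} {p : List Int}
    (h : ReachL info edges p) : p ≠ [] := by
  cases h <;> simp

lemma reachL_inv {info : List Int} {edges : List (Int × Int)} {p : List Int}
    (h : ReachL info edges p) : p.Nodup ∧ ∀ x ∈ p, x = 0 ∨ x ∈ edges.map (·.2) := by
  induction h with
  | base =>
    refine ⟨by simp, ?_⟩
    intro x hx
    simp only [List.mem_singleton] at hx
    exact Or.inl hx
  | step hre hval he hfr ht ih =>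
    obtain ⟨hnd, hrg⟩ := ih
    refine ⟨?_, ?_⟩
    · simp only [List.nodup_append, List.nodup_singleton, true_and]
      refine ⟨hnd, ?_⟩
      intro a ha b hb hab
      rw [List.mem_singleton] at hb
      subst hb
      subst hab
      exact ht ha
    · intro x hx
      rcases List.mem_append.mp hx with hx | hx
      · exact hrg x hx
      · simp only [List.mem_singleton] at hx
        subst hx
        exact Or.inr (List.mem_map.mpr ⟨_, he, rfl⟩)

lemma nodup_range_length_le {p : List Int} {l : List Int} (hnd : p.Nodup)
    (hr : ∀ x ∈ p, x = 0 ∨ x ∈ l) : p.length ≤ 1 + l.length := by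
  classical
  have hsub : p.toFinset ⊆ insert 0 l.toFinset := by
    intro y hy
    rw [List.mem_toFinset] at hy
    rcases hr y hy with h0 | hl
    · simp [h0]
    · simp [List.mem_toFinset.mpr hl]
  have hcard := Finset.card_le_card hsub
  rw [List.toFinset_card_of_nodup hnd] at hcard
  have h1 : (insert (0 : Int) l.toFinset).card ≤ 1 + l.toFinset.card := by
    rcases Finset.card_insert_le 0 l.toFinset with h
    omega
  have h2 : l.toFinset.card ≤ l.length := l.toFinset_card_le
  omega

-- ---------- A side ----------
lemma dfsA_succ_eq (info : List Int) (edges : List (Int × Int)) (fuel : Nat) (idx : Int) (p : List Int) :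
    dfsA info edges (fuel + 1) idx (shL info p) ((p.length : Int) - shL info p) (p ++ [idx]) =
      if shL info (p ++ [idx]) ≤ ((p ++ [idx]).length : Int) - shL info (p ++ [idx]) then 0
      else (p ++ [idx]).foldl (fun acc now => edges.foldl (fun acc2 e =>
          if now == e.1 && !((p ++ [idx]).contains e.2) then
            max acc2 (dfsA info edges fuel e.2 (shL info (p ++ [idx]))
              (((p ++ [idx]).length : Int) - shL info (p ++ [idx])) ((p ++ [idx]) ++ [e.2]))
          else acc2) acc) (shL info (p ++ [idx])) := by
  have hs := shL_append_singleton info p idx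
  by_cases hb : ((PySem.List.pyGet? info idx).getD 0 == 0) = true
  · rw [if_pos hb] at hs
    have harith : ((p ++ [idx]).length : Int) - (shL info p + 1)
        = (p.length : Int) - shL info p := by
      simp only [List.length_append, List.length_singleton]
      push_cast
      ring
    rw [dfsA]
    simp only [hb, if_true, hs, harith]
  · rw [if_neg hb, add_zero] at hs
    have harith : ((p ++ [idx]).length : Int) - shL info p
        = ((p.length : Int) - shL info p) + 1 := by
      simp only [List.length_append, List.length_singleton]
      push_cast
      ring
    rw [dfsA]
    simp only [hb, Bool.false_eq_true, if_false, hs, harith]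

lemma dfsA_le (info : List Int) (edges : List (Int × Int)) (x : Int)
    (hub : ∀ q, ReachL info edges q → validL info q → shL info q ≤ x) (hx : 0 ≤ x) :
    ∀ (fuel : Nat) (p : List Int) (idx : Int), ReachL info edges (p ++ [idx]) →
      dfsA info edges fuel idx (shL info p) ((p.length : Int) - shL info p) (p ++ [idx]) ≤ x := by
  intro fuel
  induction fuel with
  | zero =>
    intro p idx _
    simpa [dfsA] using hx
  | succ fuel ih =>
    intro p idx hre
    rw [dfsA_succ_eq]
    split
    · exact hx
    · next hguard =>
      have hval : validL info (p ++ [idx]) := by rw [validL]; omega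
      refine List.foldlRecOn (motive := fun a => a ≤ x) _ _
        (b := shL info (p ++ [idx])) (hub _ hre hval) ?_
      intro b hb now hnow
      refine List.foldlRecOn (motive := fun a => a ≤ x) _ _ (b := b) hb ?_
      intro b2 hb2 e he
      by_cases hc : (now == e.1 && !((p ++ [idx]).contains e.2)) = true
      · rw [if_pos hc]
        simp only [Bool.and_eq_true, beq_iff_eq, Bool.not_eq_true'] at hc
        obtain ⟨hfr, hcont⟩ := hc
        have hnotmem : e.2 ∉ p ++ [idx] := by
          simpa [List.contains_eq_mem] using hcont
        have hre' : ReachL info edges ((p ++ [idx]) ++ [e.2]) :=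
          ReachL.step hre hval (by simpa using he) (hfr ▸ hnow) hnotmem
        exact max_le hb2 (ih (p ++ [idx]) e.2 hre')
      · rw [if_neg hc]
        exact hb2

lemma dfsA_attain (info : List Int) (edges : List (Int × Int)) :
    ∀ (fuel : Nat) (p : List Int) (idx : Int), ReachL info edges (p ++ [idx]) →
      dfsA info edges fuel idx (shL info p) ((p.length : Int) - shL info p) (p ++ [idx]) = 0 ∨
      ∃ q, ReachL info edges q ∧ validL info q ∧
        dfsA info edges fuel idx (shL info p) ((p.length : Int) - shL info p) (p ++ [idx]) = shL info q := by
  intro fuel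
  induction fuel with
  | zero =>
    intro p idx _
    exact Or.inl rfl
  | succ fuel ih =>
    intro p idx hre
    rw [dfsA_succ_eq]
    split
    · exact Or.inl rfl
    · next hguard =>
      have hval : validL info (p ++ [idx]) := by rw [validL]; omega
      right
      refine List.foldlRecOn
        (motive := fun a => ∃ q, ReachL info edges q ∧ validL info q ∧ a = shL info q) _ _
        (b := shL info (p ++ [idx])) ⟨p ++ [idx], hre, hval, rfl⟩ ?_
      intro b hb now hnow
      refine List.foldlRecOn
        (motive := fun a => ∃ q, ReachL info edges q ∧ validL info q ∧ a = shL info q) _ _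
        (b := b) hb ?_
      intro b2 hb2 e he
      by_cases hc : (now == e.1 && !((p ++ [idx]).contains e.2)) = true
      · rw [if_pos hc]
        simp only [Bool.and_eq_true, beq_iff_eq, Bool.not_eq_true'] at hc
        obtain ⟨hfr, hcont⟩ := hc
        have hnotmem : e.2 ∉ p ++ [idx] := by
          simpa [List.contains_eq_mem] using hcont
        have hre' : ReachL info edges ((p ++ [idx]) ++ [e.2]) :=
          ReachL.step hre hval (by simpa using he) (hfr ▸ hnow) hnotmem
        rcases ih (p ++ [idx]) e.2 hre' with h0 | ⟨q, hq, hv, heq⟩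
        · rw [h0]
          obtain ⟨q, hq, hv, heq⟩ := hb2
          have hnn : (0 : Int) ≤ b2 := heq ▸ shL_nonneg info q
          rw [max_eq_left hnn]
          exact ⟨q, hq, hv, heq⟩
        · rcases max_choice b2 (dfsA info edges fuel e.2 (shL info (p ++ [idx]))
              (((p ++ [idx]).length : Int) - shL info (p ++ [idx])) ((p ++ [idx]) ++ [e.2])) with hmax | hmax
          · rw [hmax]
            exact hb2
          · rw [hmax]
            exact ⟨q, hq, hv, heq⟩
      · rw [if_neg hc]
        exact hb2

lemma dfsA_chain (info : List Int) (edges : List (Int × Int)) :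
    ∀ q, ReachL info edges q → ∀ p idx, q = p ++ [idx] →
      dfsA info edges (edges.length + 2 - q.length) idx (shL info p) ((p.length : Int) - shL info p) q
        ≤ solution info edges := by
  intro q hq
  induction hq with
  | base =>
    intro p idx h
    have hp : p = [] := by
      cases p with
      | nil => rfl
      | cons a tl =>
        exfalso
        have hl := congrArg List.length h
        simp at hl
    subst hp
    have hidx : idx = 0 := by simpa using h.symm
    subst hidx
    simp only [List.length_singleton]
    have h1 : edges.length + 2 - 1 = edges.length + 1 := by omega
    rw [h1]
    have h2 : dfsA info edges (edges.length + 1) 0 (shL info []) ((([] : List Int).length : Int) - shL info []) [0]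
        = solution info edges := by
      simp [solution, shL]
    rw [h2]
  | @step p0 fr t hre hval he hfr ht ih =>
    intro p idx h
    obtain ⟨hp, hti⟩ := List.append_inj' h.symm rfl
    subst hp
    have hti' : idx = t := by simpa using hti
    subst hti'
    obtain hnnil := reachL_ne_nil hre
    obtain ⟨pd, pl, hdec⟩ : ∃ pd pl, p = pd ++ [pl] :=
      ⟨p.dropLast, p.getLast hnnil, (List.dropLast_append_getLast hnnil).symm⟩
    have IH := ih pd pl hdec
    refine le_trans ?_ IH
    have hinv := reachL_inv (ReachL.step hre hval he hfr ht)
    have hlen : (p ++ [idx]).length ≤ 1 + edges.length := by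
      have := nodup_range_length_le hinv.1 hinv.2
      simpa [List.length_map] using this
    simp only [List.length_append, List.length_singleton] at hlen ⊢
    have hfuel : edges.length + 2 - p.length = (edges.length + 2 - (p.length + 1)) + 1 := by omega
    conv_rhs => rw [hfuel, hdec]
    rw [dfsA_succ_eq]
    simp only [← hdec]
    have hguard : ¬ (shL info p ≤ (p.length : Int) - shL info p) := by
      rw [validL] at hval
      omega
    rw [if_neg hguard]
    refine pv_foldl_le_of_mem ?_ hfr ?_ (shL info p)
    · intro a now
      refine pv_foldl_ge _ ?_ edges a
      intro a2 e
      split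
      · exact le_max_left _ _
      · exact le_refl _
    · intro a
      refine pv_foldl_le_of_mem ?_ he ?_ a
      · intro a2 e
        split
        · exact le_max_left _ _
        · exact le_refl _
      · intro a2
        have hcond : (fr == (fr, idx).1 && !(p.contains idx)) = true := by
          simp [List.contains_eq_mem, ht]
        rw [if_pos hcond]
        exact le_max_right _ _

lemma shL_le_solution (info : List Int) (edges : List (Int × Int))
    {q : List Int} (hq : ReachL info edges q) (hval : validL info q) :
    shL info q ≤ solution info edges := by
  obtain hnnil := reachL_ne_nil hq
  obtain ⟨qd, ql, hdec⟩ : ∃ qd ql, q = qd ++ [ql] :=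
    ⟨q.dropLast, q.getLast hnnil, (List.dropLast_append_getLast hnnil).symm⟩
  have hchain := dfsA_chain info edges q hq _ _ hdec
  refine le_trans ?_ hchain
  have hinv := reachL_inv hq
  have hlen : q.length ≤ 1 + edges.length := by
    have := nodup_range_length_le hinv.1 hinv.2
    simpa [List.length_map] using this
  have hpos : 0 < q.length := List.length_pos_iff.mpr hnnil
  have hfuel : edges.length + 2 - q.length = (edges.length + 1 - q.length) + 1 := by omega
  rw [hfuel]
  conv_rhs => rw [hdec]
  rw [dfsA_succ_eq]
  simp only [← hdec]
  have hguard : ¬ (shL info q ≤ (q.length : Int) - shL info q) := by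
    rw [validL] at hval
    omega
  rw [if_neg hguard]
  refine pv_foldl_ge _ ?_ q (shL info q)
  intro a now
  refine pv_foldl_ge _ ?_ edges a
  intro a2 e
  split
  · exact le_max_left _ _
  · exact le_refl _

-- ---------- B side ----------
def adjOf (edges : List (Int × Int)) : PySem.Dict Int (List Int) :=
  edges.foldl (fun d e => d.modify e.1 [] (· ++ [e.2])) PySem.Dict.empty

lemma adj_mem (edges : List (Int × Int)) (fr t : Int) :
    t ∈ (adjOf edges).getD fr [] ↔ (fr, t) ∈ edges := by
  rw [adjOf, PySem.Dict.getD_foldl_modify_append]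
  rw [PySem.Dict.getD_empty]
  simp only [List.nil_append, List.mem_map, List.mem_filter, beq_iff_eq]
  constructor
  · rintro ⟨e, ⟨he, h1⟩, h2⟩
    have : e = (fr, t) := by
      cases e
      simp_all
    rwa [this] at he
  · intro h
    exact ⟨(fr, t), ⟨h, rfl⟩, rfl⟩

def gB (info : List Int) (adj : PySem.Dict Int (List Int)) (cb : List (List Int) × Int) :
    List (List Int) × Int :=
  cb.1.foldl (stepB info adj) ([], cb.2)

lemma solution_alt_eq (info : List Int) (edges : List (Int × Int)) :
    solution_alt info edges = ((gB info (adjOf edges))^[edges.length + 1] ([[0]], 0)).2 := by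
  have hfun : (fun (cb : List (List Int) × Int) (_ : Nat) =>
      (cb.1.foldl (stepB info (edges.foldl (fun d e => d.modify e.1 [] (· ++ [e.2])) PySem.Dict.empty)) (([] : List (List Int)), cb.2)))
      = (fun cb _ => gB info (adjOf edges) cb) := rfl
  show ((List.range (edges.length + 1)).foldl _ ([[0]], (0 : Int))).2 = _
  rw [hfun, pv_foldl_const, List.length_range]

lemma insSorted_perm (x : Int) (l : List Int) : (insSorted x l).Perm (x :: l) := by
  induction l with
  | nil => simp [insSorted]
  | cons y t ih =>
    rw [insSorted]
    split
    · exact List.Perm.refl _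
    · exact (List.Perm.cons y ih).trans (List.Perm.swap x y t)

lemma stepB_fst_mono (info : List Int) (adj : PySem.Dict Int (List Int))
    (acc : List (List Int) × Int) (s : List Int) {x : List Int} (hx : x ∈ acc.1) :
    x ∈ (stepB info adj acc s).1 := by
  rw [stepB]
  split
  · exact hx
  · refine pv_foldl_mem_mono ?_ s acc.1 hx
    intro nx node y hy
    refine pv_foldl_mem_mono ?_ _ nx hy
    intro nx2 t2 z hz
    split
    · exact hz
    · rw [PySem.Set.add]
      split
      · exact hz
      · exact List.mem_append_left _ hz

lemma stepB_snd_mono (info : List Int) (adj : PySem.Dict Int (List Int))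
    (acc : List (List Int) × Int) (s : List Int) : acc.2 ≤ (stepB info adj acc s).2 := by
  rw [stepB]
  split
  · exact le_refl _
  · simp only
    split
    · next h => exact le_of_lt h
    · exact le_refl _

lemma foldl_stepB_fst_mono (info : List Int) (adj : PySem.Dict Int (List Int))
    (cur : List (List Int)) (acc : List (List Int) × Int) {x : List Int} (hx : x ∈ acc.1) :
    x ∈ (cur.foldl (stepB info adj) acc).1 := by
  induction cur generalizing acc with
  | nil => exact hx
  | cons s t ih => exact ih _ (stepB_fst_mono info adj acc s hx)

lemma foldl_stepB_snd_mono (info : List Int) (adj : PySem.Dict Int (List Int))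
    (cur : List (List Int)) (acc : List (List Int) × Int) :
    acc.2 ≤ (cur.foldl (stepB info adj) acc).2 := by
  induction cur generalizing acc with
  | nil => exact le_refl _
  | cons s t ih => exact le_trans (stepB_snd_mono info adj acc s) (ih _)

lemma stepB_valid_snd (info : List Int) (adj : PySem.Dict Int (List Int))
    (acc : List (List Int) × Int) (s : List Int) (hv : validL info s) :
    shL info s ≤ (stepB info adj acc s).2 := by
  rw [validL] at hv
  simp only [stepB, sheepCnt_eq]
  split
  · next hguard => omega
  · simp only
    split
    · exact le_refl _
    · next h => omega

lemma stepB_valid_fst (info : List Int) (adj : PySem.Dict Int (List Int))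
    (acc : List (List Int) × Int) (s : List Int) (hv : validL info s) {node t2 : Int}
    (hnode : node ∈ s) (ht2 : t2 ∈ adj.getD node []) (hns : t2 ∉ s) :
    insSorted t2 s ∈ (stepB info adj acc s).1 := by
  rw [validL] at hv
  simp only [stepB, sheepCnt_eq]
  split
  · next hguard => omega
  · simp only
    have hmono : ∀ (nx2 : List (List Int)) (t3 : Int) (z : List Int), z ∈ nx2 →
        z ∈ (if s.contains t3 then nx2 else PySem.Set.add nx2 (insSorted t3 s)) := by
      intro nx2 t3 z hz
      split
      · exact hz
      · simp [PySem.Set.mem_add, hz]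
    refine pv_foldl_mem_of_mem ?_ hnode ?_ acc.1
    · intro nx node' y hy
      exact pv_foldl_mem_mono (fun nx2 t3 z hz => hmono nx2 t3 z hz) _ nx hy
    · intro nx
      refine pv_foldl_mem_of_mem (fun nx2 t3 z hz => hmono nx2 t3 z hz) ht2 ?_ nx
      intro nx2
      have hc : s.contains t2 = false := by
        simp only [List.contains_eq_mem, decide_eq_false_iff_not]
        exact hns
      simp only [hc, Bool.false_eq_true, if_false]
      simp [PySem.Set.mem_add]

def InvB (info : List Int) (edges : List (Int × Int)) (k : Nat) (cb : List (List Int) × Int) : Prop :=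
  (∀ s ∈ cb.1, ∃ q, ReachL info edges q ∧ q.Perm s ∧ q.length = k + 1) ∧
  (∀ q, ReachL info edges q → q.length = k + 1 → ∃ s ∈ cb.1, q.Perm s) ∧
  (cb.2 = 0 ∨ ∃ q, ReachL info edges q ∧ validL info q ∧ cb.2 = shL info q) ∧
  (∀ q, ReachL info edges q → validL info q → q.length ≤ k → shL info q ≤ cb.2)

lemma InvB_step (info : List Int) (edges : List (Int × Int))
    (k : Nat) (cb : List (List Int) × Int) (h : InvB info edges k cb) :
    InvB info edges (k + 1) (gB info (adjOf edges) cb) := by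
  obtain ⟨hS1, hS2, hS3, hS4⟩ := h
  rw [gB]
  have hC : (∀ t ∈ (cb.1.foldl (stepB info (adjOf edges)) ([], cb.2)).1,
        ∃ q, ReachL info edges q ∧ q.Perm t ∧ q.length = k + 2) ∧
      ((cb.1.foldl (stepB info (adjOf edges)) ([], cb.2)).2 = 0 ∨
        ∃ q, ReachL info edges q ∧ validL info q ∧
          (cb.1.foldl (stepB info (adjOf edges)) ([], cb.2)).2 = shL info q) := by
    refine List.foldlRecOn (motive := fun (acc : List (List Int) × Int) =>
        (∀ t ∈ acc.1, ∃ q, ReachL info edges q ∧ q.Perm t ∧ q.length = k + 2) ∧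
        (acc.2 = 0 ∨ ∃ q, ReachL info edges q ∧ validL info q ∧ acc.2 = shL info q))
      cb.1 (stepB info (adjOf edges)) (b := ([], cb.2)) ⟨by intro t ht; simp at ht, hS3⟩ ?_
    rintro acc ⟨hA1, hA2⟩ s hs
    obtain ⟨qs, hqs, hperm, hlen⟩ := hS1 s hs
    simp only [stepB, sheepCnt_eq]
    split
    · exact ⟨hA1, hA2⟩
    · next hguard =>
      have hvs : validL info s := by rw [validL]; omega
      have hvqs : validL info qs := (validL_perm info hperm).mpr hvs
      constructor
      · simp only
        refine List.foldlRecOn (motive := fun (nx : List (List Int)) =>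
            ∀ t ∈ nx, ∃ q, ReachL info edges q ∧ q.Perm t ∧ q.length = k + 2)
          s _ (b := acc.1) hA1 ?_
        intro nx hnx node hnode
        refine List.foldlRecOn (motive := fun (nx2 : List (List Int)) =>
            ∀ t ∈ nx2, ∃ q, ReachL info edges q ∧ q.Perm t ∧ q.length = k + 2)
          _ _ (b := nx) hnx ?_
        intro nx2 hnx2 t2 ht2 t ht
        by_cases hc : s.contains t2 = true
        · rw [if_pos hc] at ht
          exact hnx2 t ht
        · rw [if_neg hc] at ht
          rcases (PySem.Set.mem_add nx2 (insSorted t2 s) t).mp ht with h | h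
          · exact hnx2 t h
          · have hedge : (node, t2) ∈ edges := (adj_mem edges node t2).mp ht2
            have hts : t2 ∉ s := by simpa [List.contains_eq_mem] using hc
            have hq' : ReachL info edges (qs ++ [t2]) :=
              ReachL.step hqs hvqs hedge (hperm.mem_iff.mpr hnode)
                (fun hmem => hts (hperm.mem_iff.mp hmem))
            refine ⟨qs ++ [t2], hq', ?_, by simp [hlen]⟩
            subst h
            exact ((List.perm_append_singleton t2 qs).trans
              (List.Perm.cons t2 hperm)).trans (insSorted_perm t2 s).symm
      · simp only
        split
        · exact Or.inr ⟨qs, hqs, hvqs, (shL_perm info hperm).symm⟩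
        · exact hA2
  obtain ⟨hC1, hC2⟩ := hC
  refine ⟨hC1, ?_, hC2, ?_⟩
  · intro q' hq' hlen'
    cases hq' with
    | base => exfalso; simp at hlen'
    | @step p0 fr t hre hval he hfr ht =>
        have hlen0 : p0.length = k + 1 := by
          simp only [List.length_append, List.length_singleton] at hlen'
          omega
        obtain ⟨s, hs, hperm⟩ := hS2 p0 hre hlen0
        obtain ⟨c1, c2, hsplit⟩ := List.append_of_mem hs
        rw [hsplit, List.foldl_append, List.foldl_cons]
        have hvs : validL info s := (validL_perm info hperm).mp hval
        have hins : insSorted t s ∈ (stepB info (adjOf edges)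
            (List.foldl (stepB info (adjOf edges)) ([], cb.2) c1) s).1 :=
          stepB_valid_fst _ _ _ _ hvs (hperm.mem_iff.mp hfr)
            ((adj_mem edges _ _).mpr he) (fun hmem => ht (hperm.mem_iff.mpr hmem))
        refine ⟨insSorted t s, foldl_stepB_fst_mono _ _ c2 _ hins, ?_⟩
        exact ((List.perm_append_singleton t p0).trans
          (List.Perm.cons t hperm)).trans (insSorted_perm t s).symm
  · intro q hq hv hlen
    rcases Nat.lt_or_ge q.length (k + 1) with hl | hl
    · have hle : shL info q ≤ cb.2 := hS4 q hq hv (by omega)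
      exact le_trans hle (foldl_stepB_snd_mono _ _ _ _)
    · have hlen1 : q.length = k + 1 := by omega
      obtain ⟨s, hs, hperm⟩ := hS2 q hq hlen1
      obtain ⟨c1, c2, hsplit⟩ := List.append_of_mem hs
      rw [hsplit, List.foldl_append, List.foldl_cons]
      have hvs : validL info s := (validL_perm info hperm).mp hv
      have h1 : shL info s ≤ (stepB info (adjOf edges)
          (List.foldl (stepB info (adjOf edges)) ([], cb.2) c1) s).2 :=
        stepB_valid_snd _ _ _ _ hvs
      rw [shL_perm info hperm]
      exact le_trans h1 (foldl_stepB_snd_mono _ _ c2 _)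

lemma InvB_iter (info : List Int) (edges : List (Int × Int)) :
    ∀ j, InvB info edges j ((gB info (adjOf edges))^[j] ([[0]], 0)) := by
  intro j
  induction j with
  | zero =>
    simp only [Function.iterate_zero, id_eq]
    refine ⟨?_, ?_, Or.inl rfl, ?_⟩
    · intro s hs
      rw [List.mem_singleton] at hs
      subst hs
      exact ⟨[0], ReachL.base, List.Perm.refl _, rfl⟩
    · intro q hq hlen
      cases hq with
      | base => exact ⟨[0], by simp, List.Perm.refl _⟩
      | step hre hval he hfr ht =>
        exfalso
        have hp := reachL_ne_nil hre
        have hpos : 0 < _ := List.length_pos_iff.mpr hp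
        simp only [List.length_append, List.length_singleton] at hlen
        omega
    · intro q hq hval hlen
      exfalso
      have h1 := reachL_ne_nil hq
      have : 0 < q.length := List.length_pos_iff.mpr h1
      omega
  | succ j ih =>
    rw [Function.iterate_succ_apply']
    exact InvB_step info edges j _ ih

-- ===== VERDICT =====
theorem solution_spec : Claim_equal_solution := by
  intro info edges hdom hpre
  unfold Spec_solution
  obtain ⟨hS1, hS2, hS3, hS4⟩ := InvB_iter info edges (edges.length + 1)
  rw [solution_alt_eq]
  have hBnn : 0 ≤ ((gB info (adjOf edges))^[edges.length + 1] ([[0]], 0)).2 := by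
    rcases hS3 with h0 | ⟨q, _, _, h⟩
    · rw [h0]
    · rw [h]; exact shL_nonneg _ _
  have hBub : ∀ q, ReachL info edges q → validL info q →
      shL info q ≤ ((gB info (adjOf edges))^[edges.length + 1] ([[0]], 0)).2 := by
    intro q hq hv
    refine hS4 q hq hv ?_
    obtain ⟨hnd, hrg⟩ := reachL_inv hq
    have h := nodup_range_length_le hnd hrg
    rw [List.length_map] at h
    omega
  have hre0 : ReachL info edges (([] : List Int) ++ [0]) := ReachL.base
  have h1 : solution info edges ≤ ((gB info (adjOf edges))^[edges.length + 1] ([[0]], 0)).2 := by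
    have := dfsA_le info edges _ hBub hBnn (edges.length + 1) [] 0 hre0
    simpa [solution, shL] using this
  have h2 : ((gB info (adjOf edges))^[edges.length + 1] ([[0]], 0)).2 ≤ solution info edges := by
    rcases hS3 with h0 | ⟨q, hq, hv, heq⟩
    · rw [h0]
      have hs : solution info edges = dfsA info edges (edges.length + 1) 0 (shL info [])
          ((([] : List Int).length : Int) - shL info []) (([] : List Int) ++ [0]) := by
        simp [solution, shL]
      rcases dfsA_attain info edges (edges.length + 1) [] 0 hre0 with h | ⟨q, _, _, h⟩
      · rw [hs, h]
      · rw [hs, h]; exact shL_nonneg _ _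
    · rw [heq]; exact shL_le_solution info edges hq hv
  exact le_antisymm h1 h2
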